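-- pv_equiv track=rewrite | github.com/CMihai998/Artificial-Intelligence | Lab6 -DT/Controller.py | updateAttributes
-- ===== SOURCE A (Python) =====
-- def updateAttributes(attributes, labelToRemove):
-- 	deleted = False
-- 	for key in list(attributes):
-- 		if deleted:
-- 			attributes[key] -= 1
-- 		if key == labelToRemove:
-- 			deleted = True
-- 			del attributes[key]
-- 	return attributes
-- ===== SOURCE B (Python) =====
-- def updateAttributes(attributes, labelToRemove):
--     keys = list(attributes)
--     if labelToRemove not in attributes:
--         return attributes
--     idx = keys.index(labelToRemove)
--     del attributes[labelToRemove]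
--     for key in keys[idx + 1:]:
--         attributes[key] -= 1
--     return attributes
-- ===== Notes on version B (the rewrite author's own statement) =====
-- stated objective: simpler
-- what changed: Replaces A's single sweep threading a boolean 'deleted' flag with a locate phase (index of the key) followed by one delete and a suffix-only decrement loop over keys[idx+1:], with an early return when the key is absent.
import Mathlib
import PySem

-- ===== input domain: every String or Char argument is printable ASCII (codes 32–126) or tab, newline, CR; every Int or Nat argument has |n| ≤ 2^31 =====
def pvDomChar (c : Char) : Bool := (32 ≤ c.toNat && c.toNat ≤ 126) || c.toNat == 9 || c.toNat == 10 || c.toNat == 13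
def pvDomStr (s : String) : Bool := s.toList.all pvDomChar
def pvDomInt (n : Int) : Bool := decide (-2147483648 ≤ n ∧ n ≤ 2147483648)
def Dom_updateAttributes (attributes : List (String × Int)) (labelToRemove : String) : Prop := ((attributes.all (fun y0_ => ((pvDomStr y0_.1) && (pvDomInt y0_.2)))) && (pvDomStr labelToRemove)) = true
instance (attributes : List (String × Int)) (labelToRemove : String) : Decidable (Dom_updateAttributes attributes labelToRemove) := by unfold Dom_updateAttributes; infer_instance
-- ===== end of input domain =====

-- B replaces A's boolean-flag sweep by a locate phase plus a suffix-only decrement loop (simpler); both mutate the dict in place in Python, equivalence is about the returned dict.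

-- ===== PORT A =====
-- loop body of A: decrement current key if already past the removed label, erase when the label is met
def pvStepA (label : String) (st : PySem.Dict String Int × Bool) (key : String) : PySem.Dict String Int × Bool :=
  let d := if st.2 then st.1.modify key 0 (fun v => v - 1) else st.1
  if key == label then (d.erase key, true) else (d, st.2)

def updateAttributes (attributes : List (String × Int)) (labelToRemove : String) : List (String × Int) :=
  let d0 := PySem.Dict.ofList attributes
  ((d0.keys).foldl (pvStepA labelToRemove) (d0, false)).1.items

-- ===== PORT B =====
-- attributes[key] -= 1
def pvDec (d : PySem.Dict String Int) (key : String) : PySem.Dict String Int :=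
  d.modify key 0 (fun v => v - 1)

def updateAttributes_alt (attributes : List (String × Int)) (labelToRemove : String) : List (String × Int) :=
  let d := PySem.Dict.ofList attributes
  let keys := d.keys
  if d.contains labelToRemove then
    match PySem.List.index? keys labelToRemove with
    | some idx =>
        ((PySem.List.slice keys (some ((idx : Int) + 1)) none).foldl pvDec (d.erase labelToRemove)).items
    | none => d.items   -- unreachable: the label is contained
  else
    d.items

-- ===== PRECONDITION & SPEC =====
def Spec_updateAttributes (attributes : List (String × Int)) (labelToRemove : String) (out : List (String × Int)) : Prop := out = updateAttributes_alt attributes labelToRemove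
instance (attributes : List (String × Int)) (labelToRemove : String) (out : List (String × Int)) : Decidable (Spec_updateAttributes attributes labelToRemove out) := by unfold Spec_updateAttributes; infer_instance

-- ===== CLAIM (what is proved, stated in full; the proofs are below) =====
def Claim_equal_updateAttributes : Prop := ∀ (attributes : List (String × Int)) (labelToRemove : String), Dom_updateAttributes attributes labelToRemove → Spec_updateAttributes attributes labelToRemove (updateAttributes attributes labelToRemove)

-- ===== LEMMAS AND PROOFS =====

-- one step of A's loop, before the label has been met
theorem stepA_false {label k : String} (d : PySem.Dict String Int) (hk : k ≠ label) :
    pvStepA label (d, false) k = (d, false) := by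
  simp [pvStepA, hk]

-- one step of A's loop, after the label has been met
theorem stepA_true {label k : String} (d : PySem.Dict String Int) (hk : k ≠ label) :
    pvStepA label (d, true) k = (pvDec d k, true) := by
  simp [pvStepA, pvDec, hk]

-- the step that meets the label (from a fresh start) just erases it
theorem stepA_hit (label : String) (d : PySem.Dict String Int) :
    pvStepA label (d, false) label = (d.erase label, true) := by
  simp [pvStepA]

-- after the label is met, A's loop is exactly the decrement fold
theorem foldA_true (label : String) : ∀ (ks : List String) (d : PySem.Dict String Int),
    label ∉ ks → ks.foldl (pvStepA label) (d, true) = (ks.foldl pvDec d, true) := by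
  intro ks
  induction ks with
  | nil => intro d _; rfl
  | cons k rest ih =>
      intro d h
      have hk : k ≠ label := fun he => h (by simp [he])
      rw [List.foldl_cons, stepA_true d hk, List.foldl_cons]
      exact ih _ (fun hm => h (List.mem_cons_of_mem _ hm))

-- characterisation of A's whole loop from a fresh (deleted = False) start
theorem foldA_main (label : String) : ∀ (ks : List String) (d : PySem.Dict String Int),
    ks.Nodup →
    (ks.foldl (pvStepA label) (d, false)).1 =
      (match PySem.List.index? ks label with
       | none => d
       | some i => (ks.drop (i + 1)).foldl pvDec (d.erase label)) := by
  intro ks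
  induction ks with
  | nil => intro d _; rfl
  | cons k rest ih =>
      intro d hnd
      rcases List.nodup_cons.mp hnd with ⟨hk, hrest⟩
      by_cases he : k = label
      · subst he
        rw [PySem.List.index?_cons_self, List.foldl_cons, stepA_hit k d,
          foldA_true k rest (d.erase k) hk]
        simp
      · rw [PySem.List.index?_cons_of_ne rest he, List.foldl_cons, stepA_false d he,
          ih d hrest]
        cases h : PySem.List.index? rest label with
        | none => simp
        | some i => simp [List.drop_succ_cons]

-- ===== VERDICT (by name: the statement is the Claim_ definition above) =====
theorem updateAttributes_spec : Claim_equal_updateAttributes := by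
  intro attributes label _
  unfold Spec_updateAttributes updateAttributes updateAttributes_alt
  simp only []
  set d0 := PySem.Dict.ofList attributes with hd0
  have hnd : d0.keys.Nodup := PySem.Dict.nodup_keys_ofList attributes
  rw [foldA_main label d0.keys d0 hnd]
  cases h : PySem.List.index? d0.keys label with
  | none =>
      have hmem : label ∉ d0.keys := (PySem.List.index?_eq_none_iff d0.keys label).mp h
      have hc : d0.contains label = false := by
        by_contra hcc
        exact hmem ((PySem.Dict.contains_iff_mem_keys d0 label).mp (by simpa using hcc))
      simp [hc]
  | some i =>
      have hmem : label ∈ d0.keys := by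
        have := PySem.List.index?_isSome_iff d0.keys label
        exact this.mp (by rw [h]; rfl)
      have hc : d0.contains label = true := (PySem.Dict.contains_iff_mem_keys d0 label).mpr hmem
      have hslice : PySem.List.slice d0.keys (some ((i : Int) + 1)) none = d0.keys.drop (i + 1) := by
        have hcast : ((i : Int) + 1) = ((i + 1 : Nat) : Int) := by push_cast; ring
        rw [hcast, PySem.List.slice_from_natCast]
      simp [hc, hslice]
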